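-- pv_equiv track=rewrite | github.com/MeanderingProgrammer/advent-of-code | 2015/5/solver.py | repeat_non_overlapping
-- ===== SOURCE A (Python) =====
-- from collections import defaultdict
--
-- def repeat_non_overlapping(groups):
--     group_frequencies = defaultdict(int)
--     group_frequencies[groups[0]] += 1
--
--     for i, group in enumerate(groups[1:]):
--         num_needed = 1 if group != groups[i] else 2
--         if group_frequencies[group] >= num_needed:
--             return True
--         group_frequencies[group] += 1
--
--     return False
-- ===== SOURCE B (Python) =====
-- def repeat_non_overlapping(groups):
--     first_seen = {}
--     for q, group in enumerate(groups):
--         p = first_seen.get(group)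
--         if p is not None:
--             if p <= q - 2:
--                 return True
--         else:
--             first_seen[group] = q
--     return False
-- ===== Notes on version B (the rewrite author's own statement) =====
-- stated objective: simpler
-- what changed: Replaces the frequency counter plus predecessor-comparison (need 1 or 2 occurrences depending on whether the current group equals the previous one) with a dict of first-occurrence indices and a single index-distance test first[g] <= q-2; the groups[i] predecessor read disappears.
-- outside the precondition, e.g. on repeat_non_overlapping([]): A raises IndexError, B returns False
-- crash fix: On the empty list A raises IndexError (it reads groups[0] before the loop); B's loop simply never runs and it returns False. — e.g. on repeat_non_overlapping([]): A raises IndexError, B returns false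
import Mathlib
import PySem

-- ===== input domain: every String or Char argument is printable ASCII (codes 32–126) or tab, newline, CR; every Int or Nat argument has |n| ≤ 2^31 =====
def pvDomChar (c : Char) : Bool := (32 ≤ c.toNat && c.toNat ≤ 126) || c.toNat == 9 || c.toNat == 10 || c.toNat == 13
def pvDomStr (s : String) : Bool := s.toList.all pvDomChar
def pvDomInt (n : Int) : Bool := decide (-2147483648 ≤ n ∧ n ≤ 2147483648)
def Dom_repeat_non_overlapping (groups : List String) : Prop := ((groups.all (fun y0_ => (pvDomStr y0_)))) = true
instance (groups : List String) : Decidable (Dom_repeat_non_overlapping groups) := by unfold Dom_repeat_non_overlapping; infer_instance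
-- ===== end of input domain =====

-- B replaces A's frequency counter + predecessor comparison with a dict of first-occurrence
-- indices and a single index-distance test (objective: simpler). On the empty list A raises
-- IndexError while B returns false; that input is excluded by Pre_ and stated in Raises_.

-- ===== PORT A =====
-- the for-loop over enumerate(groups[1:]): i is the running index, the list argument the
-- remaining elements of groups[1:]; groups[i] is read via pyGetD (i is always in range here)
def rnoA_go (groups : List String) (freq : PySem.Dict String Int) (i : Int) :
    List String → Bool
  | [] => false
  | group :: rest =>
    let num_needed : Int := if group ≠ PySem.List.pyGetD groups i "" then 1 else 2
    if freq.getD group 0 ≥ num_needed then true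
    else rnoA_go groups (freq.insert group (freq.getD group 0 + 1)) (i + 1) rest

def repeat_non_overlapping (groups : List String) : Bool :=
  match PySem.List.pyGet? groups 0 with
  | none => false  -- Python raises IndexError here (outside Pre_)
  | some g0 =>
    let freq : PySem.Dict String Int := PySem.Dict.empty
    let freq := freq.insert g0 (freq.getD g0 0 + 1)   -- group_frequencies[groups[0]] += 1
    rnoA_go groups freq 0 (PySem.List.slice groups (some 1) none)

-- ===== PORT B =====
-- the for-loop over enumerate(groups): q is the running index, first_seen maps each group
-- to the index of its first occurrence
def rnoB_go (first : PySem.Dict String Int) (q : Int) : List String → Bool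
  | [] => false
  | group :: rest =>
    match first.get? group with
    | some p => if p ≤ q - 2 then true else rnoB_go first (q + 1) rest
    | none => rnoB_go (first.insert group q) (q + 1) rest

def repeat_non_overlapping_alt (groups : List String) : Bool :=
  rnoB_go PySem.Dict.empty 0 groups

-- ===== PRECONDITION & SPEC =====
-- Pre_ excludes only the empty list, on which A raises IndexError (groups[0]).
def Pre_repeat_non_overlapping (groups : List String) : Prop := groups ≠ []
instance (groups : List String) : Decidable (Pre_repeat_non_overlapping groups) := by
  unfold Pre_repeat_non_overlapping; infer_instance
def pvWitness_repeat_non_overlapping : List String := ["ab", "cd", "ab"]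

-- On the empty list A raises IndexError (it reads groups[0] before the loop); B's loop never runs and it returns false.
def Raises_repeat_non_overlapping (groups : List String) : Prop := groups = []
instance (groups : List String) : Decidable (Raises_repeat_non_overlapping groups) := by
  unfold Raises_repeat_non_overlapping; infer_instance
def pvRaiseWitness_repeat_non_overlapping : List String := []
def pvRaiseWitnessOut_repeat_non_overlapping : Bool := false

def Spec_repeat_non_overlapping (groups : List String) (out : Bool) : Prop :=
  out = repeat_non_overlapping_alt groups
instance (groups : List String) (out : Bool) : Decidable (Spec_repeat_non_overlapping groups out) := by
  unfold Spec_repeat_non_overlapping; infer_instance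

-- ===== CLAIM (what is proved, stated in full; the proofs are below) =====
def Claim_equal_repeat_non_overlapping : Prop :=
  ∀ (groups : List String), Dom_repeat_non_overlapping groups →
    Pre_repeat_non_overlapping groups →
    Spec_repeat_non_overlapping groups (repeat_non_overlapping groups)

def Claim_raises_repeat_non_overlapping : Prop :=
  (∀ (groups : List String), Dom_repeat_non_overlapping groups →
      Raises_repeat_non_overlapping groups → ¬ Pre_repeat_non_overlapping groups) ∧
  (Dom_repeat_non_overlapping (pvRaiseWitness_repeat_non_overlapping) ∧
   Raises_repeat_non_overlapping (pvRaiseWitness_repeat_non_overlapping) ∧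
   repeat_non_overlapping_alt (pvRaiseWitness_repeat_non_overlapping) =
     pvRaiseWitnessOut_repeat_non_overlapping)

-- ===== LEMMAS AND PROOFS =====

-- reading groups[i] at the last index of the processed prefix
lemma pyGetD_len_sub_one (pre t : List String) (h : pre ≠ []) :
    PySem.List.pyGetD (pre ++ t) ((pre.length : Int) - 1) "" = pre.getLast h := by
  have hpos : 0 < pre.length := List.length_pos_iff.mpr h
  have : ((pre.length : Int) - 1) = ((pre.length - 1 : Nat) : Int) := by omega
  rw [this, PySem.List.pyGetD_natCast]
  have hlt : pre.length - 1 < pre.length := by omega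
  rw [List.getD_eq_getElem?_getD, List.getElem?_append_left (by omega), List.getElem?_eq_getElem hlt]
  simp [List.getLast_eq_getElem]

-- the crux: A's count-vs-needed test equals B's first-index-distance test
lemma cond_iff (pre : List String) (h : pre ≠ []) (g : String) :
    ((if g ≠ pre.getLast h then (1:Int) else 2) ≤ (pre.count g : Int))
      ↔ (∃ k, PySem.List.index? pre g = some k ∧ (k : Int) ≤ (pre.length : Int) - 2) := by
  obtain ⟨ys, prev, rfl⟩ : ∃ ys prev, pre = ys ++ [prev] :=
    ⟨pre.dropLast, pre.getLast h, (List.dropLast_append_getLast h).symm⟩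
  have hlast : (ys ++ [prev]).getLast h = prev := by simp
  have hlen : (ys ++ [prev]).length = ys.length + 1 := by simp
  have hcnt : (ys ++ [prev]).count g = ys.count g + (if g = prev then 1 else 0) := by
    by_cases hpg : g = prev
    · simp [List.count_append, hpg]
    · simp [List.count_append, hpg, Ne.symm hpg]
  rw [hlast, hlen]
  by_cases hmem : g ∈ ys
  · -- g occurs in ys: both sides are true
    obtain ⟨k, hk⟩ := Option.isSome_iff_exists.mp ((PySem.List.index?_isSome_iff ys g).mpr hmem)
    obtain ⟨hklt, -, -⟩ := PySem.List.getElem_of_index?_eq_some hk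
    have hidx := PySem.List.index?_append_of_mem (l := ys) [prev] hmem
    have hc1 : 0 < ys.count g := List.count_pos_iff.mpr hmem
    constructor
    · intro _
      exact ⟨k, by rw [hidx]; exact hk, by push_cast; omega⟩
    · intro _
      by_cases hgp : g = prev
      · rw [if_neg (by simp [hgp])]
        have h2 : 2 ≤ (ys ++ [prev]).count g := by rw [hcnt, if_pos hgp]; omega
        exact_mod_cast h2
      · rw [if_pos hgp]
        have h1 : 1 ≤ (ys ++ [prev]).count g := by rw [hcnt]; omega
        exact_mod_cast h1
  · -- g not in ys
    by_cases hgp : g = prev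
    · subst hgp
      have hidx := PySem.List.index?_append_singleton_self ys g hmem
      have hc : (ys ++ [g]).count g = 1 := by
        rw [hcnt, if_pos rfl, List.count_eq_zero_of_not_mem hmem]
      rw [hc]
      constructor
      · intro hle; rw [if_neg (by simp)] at hle; norm_num at hle
      · rintro ⟨k, hk, hkle⟩
        rw [hidx] at hk
        obtain rfl : ys.length = k := by injection hk
        omega
    · have hnm : g ∉ ys ++ [prev] := by simp [hmem, hgp]
      have hidx := (PySem.List.index?_eq_none_iff (ys ++ [prev]) g).mpr hnm
      have hc : (ys ++ [prev]).count g = 0 := List.count_eq_zero_of_not_mem hnm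
      rw [hc]
      constructor
      · intro hle; rw [if_pos hgp] at hle; norm_num at hle
      · rintro ⟨k, hk, -⟩
        rw [hidx] at hk
        exact absurd hk (by simp)

-- index? is unchanged by appending an element already present (or distinct)
lemma index?_append_singleton (pre : List String) (x g : String)
    (hx : x ∈ pre ∨ g ≠ x) :
    PySem.List.index? (pre ++ [x]) g = PySem.List.index? pre g := by
  by_cases hmem : g ∈ pre
  · exact PySem.List.index?_append_of_mem _ hmem
  · have h1 := (PySem.List.index?_eq_none_iff pre g).mpr hmem
    have hgx : g ≠ x := by
      rcases hx with hx | hne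
      · intro hgx; exact hmem (hgx ▸ hx)
      · exact hne
    rw [h1, (PySem.List.index?_eq_none_iff (pre ++ [x]) g).mpr (by simp [hmem, hgx])]

-- main simulation: both loops agree over the common suffix, given the two invariants
lemma rno_main (s : List String) :
    ∀ (pre : List String) (freq first : PySem.Dict String Int),
      pre ≠ [] →
      (∀ g, freq.getD g 0 = (pre.count g : Int)) →
      (∀ g, first.get? g = (PySem.List.index? pre g).map (fun n => (n : Int))) →
      rnoA_go (pre ++ s) freq ((pre.length : Int) - 1) s
        = rnoB_go first (pre.length : Int) s := by
  induction s with
  | nil => intro pre freq first _ _ _; simp [rnoA_go, rnoB_go]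
  | cons group rest ih =>
    intro pre freq first hne hA hB
    have hprev : PySem.List.pyGetD (pre ++ group :: rest) ((pre.length : Int) - 1) ""
        = pre.getLast hne := pyGetD_len_sub_one pre _ hne
    have hcond := cond_iff pre hne group
    have hA' : ∀ g, (freq.insert group (freq.getD group 0 + 1)).getD g 0
        = ((pre ++ [group]).count g : Int) := by
      intro g
      rw [PySem.Dict.getD_insert]
      by_cases hg : g = group
      · subst hg; simp [hA, List.count_append]
      · simp [hg, Ne.symm hg, hA, List.count_append]
    simp only [rnoA_go, rnoB_go, hprev, hA, ge_iff_le]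
    cases hidx : PySem.List.index? pre group with
    | none =>
      -- not seen before: A does not return, B inserts
      have hBnone : first.get? group = none := by rw [hB, hidx]; rfl
      have hAfalse : ¬ ((if group ≠ pre.getLast hne then (1:Int) else 2) ≤ (pre.count group : Int)) := by
        intro hc
        obtain ⟨k, hk, -⟩ := hcond.mp hc
        rw [hidx] at hk; exact absurd hk (by simp)
      rw [if_neg hAfalse]
      simp only [hBnone]
      have hnotmem : group ∉ pre := (PySem.List.index?_eq_none_iff pre group).mp hidx
      have hB' : ∀ g, (first.insert group (pre.length : Int)).get? g
          = ((PySem.List.index? (pre ++ [group]) g).map (fun n => (n : Int))) := by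
        intro g
        rw [PySem.Dict.get?_insert]
        by_cases hg : g = group
        · subst hg
          rw [if_pos rfl, PySem.List.index?_append_singleton_self pre g hnotmem]
          rfl
        · rw [if_neg hg, hB g, index?_append_singleton pre group g (Or.inr hg)]
      have := ih (pre ++ [group]) (freq.insert group (freq.getD group 0 + 1))
        (first.insert group (pre.length : Int)) (by simp) hA' hB'
      simpa [hA, List.append_assoc, add_sub_cancel_right] using this
    | some k =>
      have hBsome : first.get? group = some (k : Int) := by rw [hB, hidx]; rfl
      simp only [hBsome]
      by_cases hdist : (k : Int) ≤ (pre.length : Int) - 2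
      · rw [if_pos (hcond.mpr ⟨k, hidx, hdist⟩), if_pos hdist]
      · have hAfalse : ¬ ((if group ≠ pre.getLast hne then (1:Int) else 2) ≤ (pre.count group : Int)) := by
          intro hc
          obtain ⟨k', hk', hle'⟩ := hcond.mp hc
          rw [hidx] at hk'
          obtain rfl : k = k' := by injection hk'
          exact hdist hle'
        rw [if_neg hAfalse, if_neg hdist]
        have hmem : group ∈ pre := (PySem.List.index?_isSome_iff pre group).mp (by rw [hidx]; rfl)
        have hB' : ∀ g, first.get? g
            = ((PySem.List.index? (pre ++ [group]) g).map (fun n => (n : Int))) := by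
          intro g
          rw [hB g, index?_append_singleton pre group g (Or.inl hmem)]
        have := ih (pre ++ [group]) (freq.insert group (freq.getD group 0 + 1))
          first (by simp) hA' hB'
        simpa [hA, List.append_assoc, add_sub_cancel_right] using this

-- ===== VERDICT (by name: the statement is the Claim_ definition above) =====
theorem repeat_non_overlapping_spec : Claim_equal_repeat_non_overlapping := by
  intro groups _ hpre
  unfold Spec_repeat_non_overlapping
  obtain ⟨g0, gs, rfl⟩ := List.exists_cons_of_ne_nil hpre
  have hA0 : repeat_non_overlapping (g0 :: gs)
      = rnoA_go (g0 :: gs) (PySem.Dict.empty.insert g0 (PySem.Dict.getD PySem.Dict.empty g0 0 + 1)) 0 gs := by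
    simp [repeat_non_overlapping, PySem.List.pyGet?, PySem.List.pyIdx?, PySem.List.slice_from_one]
  have hB0 : repeat_non_overlapping_alt (g0 :: gs)
      = rnoB_go (PySem.Dict.empty.insert g0 0) 1 gs := by
    simp [repeat_non_overlapping_alt, rnoB_go, PySem.Dict.get?_empty]
  rw [hA0, hB0]
  have hmain := rno_main gs [g0]
    (PySem.Dict.empty.insert g0 (PySem.Dict.getD PySem.Dict.empty g0 0 + 1))
    (PySem.Dict.empty.insert g0 0)
    (by simp)
    (by
      intro g
      rw [PySem.Dict.getD_insert]
      by_cases hg : g = g0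
      · subst hg; simp [PySem.Dict.getD_empty, List.count_cons]
      · simp [hg, Ne.symm hg, PySem.Dict.getD_empty])
    (by
      intro g
      rw [PySem.Dict.get?_insert]
      by_cases hg : g = g0
      · subst hg; simp [PySem.List.index?_cons_self]
      · simp [hg, Ne.symm hg, PySem.Dict.get?_empty, PySem.List.index?])
  simpa using hmain

@[simp]
theorem repeat_non_overlapping_raises : Claim_raises_repeat_non_overlapping := by
  unfold Claim_raises_repeat_non_overlapping
  exact ⟨fun groups _ hr hp => hp hr, by decide⟩
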